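-- pv_equiv track=rewrite | github.com/taylorbranson17/-Kinda-Yahtzee- | Yahtzee.py/scoring_utilities.py | score_for_small_straight
-- ===== SOURCE A (Python) =====
-- def  score_for_small_straight(roll:tuple) -> int:
--     """returns 30 if small straight is present, 0 if not"""
--
--     possible_sets = [{1,2,3,4},{2,3,4,5},{3,4,5,6}]
--
--     for x in possible_sets:
--         if x.issubset(roll):
--             return 30
--         else:
--             pass
--     return 0
-- ===== SOURCE B (Python) =====
-- def score_for_small_straight(roll: tuple) -> int:
--     """returns 30 if small straight is present, 0 if not"""
--     present = [f in roll for f in range(1, 7)]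
--     run = 0
--     for p in present:
--         run = run + 1 if p else 0
--         if run == 4:
--             return 30
--     return 0
-- ===== Notes on version B (the rewrite author's own statement) =====
-- stated objective: idiomatic
-- what changed: Replaces the three hardcoded candidate-set subset checks with a single scan over faces 1..6 maintaining a run length of consecutive present faces, returning 30 when the run reaches 4; this does at most 6 membership tests over the roll instead of up to 12.
import Mathlib
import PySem

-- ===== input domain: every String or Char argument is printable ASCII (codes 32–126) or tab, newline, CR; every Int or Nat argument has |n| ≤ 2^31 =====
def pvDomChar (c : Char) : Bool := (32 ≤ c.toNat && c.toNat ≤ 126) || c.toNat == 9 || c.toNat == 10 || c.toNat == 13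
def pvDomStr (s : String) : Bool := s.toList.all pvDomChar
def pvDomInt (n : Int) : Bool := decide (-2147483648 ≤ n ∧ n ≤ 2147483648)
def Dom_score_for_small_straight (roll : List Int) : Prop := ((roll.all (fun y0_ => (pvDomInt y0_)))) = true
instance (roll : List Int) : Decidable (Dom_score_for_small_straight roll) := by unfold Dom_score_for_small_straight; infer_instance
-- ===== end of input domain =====

-- B replaces A's three hardcoded subset checks with a presence scan over faces 1..6
-- keeping a running count of consecutive present faces (objective: idiomatic).

-- ===== PORT A =====
-- x.issubset(roll): every element of x occurs in roll
def pvSubsetA (x roll : List Int) : Bool := x.all (fun v => roll.contains v)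

-- the 'for x in possible_sets' loop with its early return
def pvLoopA (sets : List (List Int)) (roll : List Int) : Int :=
  match sets with
  | [] => 0
  | x :: rest => if pvSubsetA x roll then 30 else pvLoopA rest roll

def score_for_small_straight (roll : List Int) : Int :=
  pvLoopA [[1,2,3,4],[2,3,4,5],[3,4,5,6]] roll

-- ===== PORT B =====
-- the 'for p in present' loop with running count and early return
def pvScanB (present : List Bool) (run : Int) : Int :=
  match present with
  | [] => 0
  | p :: rest =>
    let run' := if p then run + 1 else 0
    if run' == 4 then 30 else pvScanB rest run'

def score_for_small_straight_alt (roll : List Int) : Int :=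
  pvScanB ((PySem.List.pyRange 1 7 1).map (fun f => roll.contains f)) 0

-- ===== PRECONDITION & SPEC =====
def Spec_score_for_small_straight (roll : List Int) (out : Int) : Prop := out = score_for_small_straight_alt roll
instance (roll : List Int) (out : Int) : Decidable (Spec_score_for_small_straight roll out) := by unfold Spec_score_for_small_straight; infer_instance

-- ===== CLAIM (what is proved, stated in full; the proofs are below) =====
def Claim_equal_score_for_small_straight : Prop := ∀ (roll : List Int), Dom_score_for_small_straight roll → Spec_score_for_small_straight roll (score_for_small_straight roll)

-- ===== LEMMAS AND PROOFS =====
theorem pyRange_1_7 : PySem.List.pyRange 1 7 1 = [1,2,3,4,5,6] := by decide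

-- both results are functions of the six membership booleans; check all 64 cases
theorem bool_table (b1 b2 b3 b4 b5 b6 : Bool) :
    (if b1 && (b2 && (b3 && (b4 && true))) then (30 : Int)
     else if b2 && (b3 && (b4 && (b5 && true))) then 30
     else if b3 && (b4 && (b5 && (b6 && true))) then 30 else 0) =
    pvScanB [b1, b2, b3, b4, b5, b6] 0 := by
  revert b1 b2 b3 b4 b5 b6; decide

theorem contains_core (roll : List Int) :
    score_for_small_straight roll = score_for_small_straight_alt roll := by
  unfold score_for_small_straight score_for_small_straight_alt
  rw [pyRange_1_7]
  simp only [pvLoopA, pvSubsetA, List.all_cons, List.all_nil, List.map]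
  exact bool_table (roll.contains 1) (roll.contains 2) (roll.contains 3)
    (roll.contains 4) (roll.contains 5) (roll.contains 6)

-- ===== VERDICT (by name: the statement is the Claim_ definition above) =====
theorem score_for_small_straight_spec : Claim_equal_score_for_small_straight := by
  intro roll _
  unfold Spec_score_for_small_straight
  exact contains_core roll
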